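-- pv_equiv track=rewrite | github.com/pwang867/LeetCode-Solutions-Python | OA/Min Moves to Make String Without 3 Identical Consecutive Letters.py | minMove
-- ===== SOURCE A (Python) =====
-- def minMove(s):
--     cnt = 0
--     i = 0
--     while i < len(s):
--         m = 1
--         while i < len(s):
--             if i + 1 < len(s) and s[i] == s[i+1]:
--                 m += 1
--                 i += 1
--             else:
--                 break
--         cnt += m//3
--         i += 1
--     return cnt
-- ===== SOURCE B (Python) =====
-- def minMove(s):
--     cnt = 0
--     i = 0
--     n = len(s)
--     while i + 2 < n:
--         if s[i] == s[i + 1] == s[i + 2]: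
--             cnt += 1
--             i += 3
--         else:
--             i += 1
--     return cnt
-- ===== Notes on version B (the rewrite author's own statement) =====
-- stated objective: alternative
-- what changed: replaces A's nested while loops that measure each run's full length and add m//3 with a sliding window of width 3: whenever the three characters at the cursor are equal, count one deletion and jump the cursor forward by 3, otherwise advance by 1 - no run lengths and no integer division are ever computed
import Mathlib
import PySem

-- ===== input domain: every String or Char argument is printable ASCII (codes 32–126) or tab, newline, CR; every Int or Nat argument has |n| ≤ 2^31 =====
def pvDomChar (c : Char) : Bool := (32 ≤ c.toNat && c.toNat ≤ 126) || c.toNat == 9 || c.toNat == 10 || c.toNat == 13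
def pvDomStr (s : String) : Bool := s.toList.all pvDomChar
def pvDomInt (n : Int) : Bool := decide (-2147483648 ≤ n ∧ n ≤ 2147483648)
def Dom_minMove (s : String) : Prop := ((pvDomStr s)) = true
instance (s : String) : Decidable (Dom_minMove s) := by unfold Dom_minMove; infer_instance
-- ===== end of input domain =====

-- B replaces A's run-measuring nested loops by a width-3 sliding window that jumps 3 on a match (objective: alternative).

-- ===== PORT A =====
-- inner while loop of A: starting on char c with m = 1, extend while the next char equals the current;
-- returns (m, rest of the list after the run)
def pvRunA (c : Char) : List Char → Int × List Char
  | [] => (1, [])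
  | d :: t => if c = d then ((pvRunA d t).1 + 1, (pvRunA d t).2) else (1, d :: t)

theorem pvRunA_len (c : Char) (l : List Char) : (pvRunA c l).2.length ≤ l.length := by
  induction l generalizing c with
  | nil => simp [pvRunA]
  | cons d t ih =>
    simp only [pvRunA]
    split
    · exact le_trans (ih d) (Nat.le_succ _)
    · simp

-- outer while loop of A: take one run, add m // 3, continue after it
def pvLoopA : List Char → Int
  | [] => 0
  | c :: t => PySem.Int.floordiv (pvRunA c t).1 3 + pvLoopA (pvRunA c t).2
termination_by l => l.length
decreasing_by exact Nat.lt_succ_of_le (pvRunA_len c t)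

def minMove (s : String) : Int := pvLoopA s.toList

-- ===== PORT B =====
-- B's while loop: look at the three chars at the cursor; on a triple count 1 and jump 3, else advance 1
def pvLoopB : List Char → Int
  | a :: b :: c :: t => if a = b ∧ b = c then 1 + pvLoopB t else pvLoopB (b :: c :: t)
  | _ => 0
termination_by l => l.length
decreasing_by all_goals (simp only [List.length_cons]; omega)

def minMove_alt (s : String) : Int := pvLoopB s.toList

-- ===== PRECONDITION & SPEC =====
def Spec_minMove (s : String) (out : Int) : Prop := out = minMove_alt s
instance (s : String) (out : Int) : Decidable (Spec_minMove s out) := by unfold Spec_minMove; infer_instance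

-- ===== CLAIM (what is proved, stated in full; the proofs are below) =====
def Claim_equal_minMove : Prop := ∀ (s : String), Dom_minMove s → Spec_minMove s (minMove s)

-- ===== LEMMAS AND PROOFS =====

-- pvRunA measures the leading run: its length + 1, and leaves the rest
theorem pvRunA_eq (c : Char) (l : List Char) :
    pvRunA c l = (((l.takeWhile (fun d => c = d)).length : Int) + 1, l.dropWhile (fun d => c = d)) := by
  induction l generalizing c with
  | nil => simp [pvRunA]
  | cons d t ih =>
    by_cases h : c = d
    · subst h
      simp [pvRunA, ih c, List.takeWhile, List.dropWhile]
    · simp [pvRunA, h, List.takeWhile, List.dropWhile]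

-- dropping one char that differs from the next does not change B's count
theorem pvLoopB_drop1 (c : Char) (r : List Char) (h : ∀ d, r.head? = some d → c ≠ d) :
    pvLoopB (c :: r) = pvLoopB r := by
  match r with
  | [] => simp [pvLoopB]
  | [d] => simp [pvLoopB]
  | d :: e :: t =>
    have hcd : c ≠ d := h d rfl
    simp [pvLoopB, hcd]

-- B over a run of L copies of c followed by a rest starting with a different char
theorem pvLoopB_run (L : Nat) (c : Char) (r : List Char) (h : ∀ d, r.head? = some d → c ≠ d) :
    pvLoopB (List.replicate L c ++ r) = ((L / 3 : Nat) : Int) + pvLoopB r := by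
  induction L using Nat.strong_induction_on with
  | _ L ih =>
    match L with
    | 0 => simp
    | 1 =>
      simp only [List.replicate_succ, List.replicate_zero, List.nil_append, List.cons_append,
        List.nil_append] at *
      rw [pvLoopB_drop1 c r h]
      simp
    | 2 =>
      simp only [List.replicate_succ, List.replicate_zero, List.nil_append, List.cons_append,
        List.nil_append] at *
      cases hr : r with
      | nil => simp [pvLoopB]
      | cons d t =>
        have hcd : c ≠ d := h d (by rw [hr]; rfl)
        have h2 : pvLoopB (c :: c :: d :: t) = pvLoopB (c :: d :: t) := by
          simp [pvLoopB, hcd]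
        have h3 : pvLoopB (c :: d :: t) = pvLoopB (d :: t) := by
          apply pvLoopB_drop1
          intro x hx
          simp at hx
          rw [hx] at hcd; exact hcd
        rw [h2, h3]
        simp
    | (n + 3) =>
      have hrep : List.replicate (n + 3) c ++ r = c :: c :: c :: (List.replicate n c ++ r) := by
        simp [List.replicate_succ]
      rw [hrep]
      have ht : pvLoopB (c :: c :: c :: (List.replicate n c ++ r)) =
          1 + pvLoopB (List.replicate n c ++ r) := by
        simp [pvLoopB]
      rw [ht, ih n (by omega)]
      have : ((n + 3) / 3 : Nat) = (n / 3 : Nat) + 1 := by omega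
      rw [this]
      push_cast
      ring

-- head of dropWhile fails the predicate
theorem pvDropWhile_head (p : Char → Bool) (l : List Char) (d : Char) (t : List Char)
    (h : l.dropWhile p = d :: t) : p d = false := by
  induction l with
  | nil => simp [List.dropWhile] at h
  | cons x xs ih =>
    simp only [List.dropWhile] at h
    split at h
    · exact ih h
    · rename_i hx
      cases h
      simpa using hx

-- main equivalence over lists
theorem pvMain (l : List Char) : pvLoopB l = pvLoopA l := by
  induction hn : l.length using Nat.strong_induction_on generalizing l with
  | _ n ih =>
    cases l with
    | nil => simp [pvLoopA, pvLoopB]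
    | cons c t =>
      have hrun := pvRunA_eq c t
      set tk := t.takeWhile (fun d => c = d) with htk
      set dr := t.dropWhile (fun d => c = d) with hdr
      have hrep : tk = List.replicate tk.length c := by
        apply List.eq_replicate_of_mem
        intro b hb
        have := List.mem_takeWhile_imp (htk ▸ hb)
        simp at this
        exact this.symm
      have hsplit : c :: t = List.replicate (tk.length + 1) c ++ dr := by
        rw [List.replicate_succ]
        simp only [List.cons_append]
        congr 1
        rw [← hrep, htk, hdr, List.takeWhile_append_dropWhile]
      have hhead : ∀ d, dr.head? = some d → c ≠ d := by
        intro d hd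
        cases hdd : dr with
        | nil => rw [hdd] at hd; exact absurd hd (by simp)
        | cons x xs =>
          rw [hdd] at hd
          have hx : x = d := by simpa using hd
          have hfalse := pvDropWhile_head (fun e => decide (c = e)) t x xs (hdr.symm.trans hdd)
          have hcx : ¬ c = x := by simpa using hfalse
          rw [← hx]; exact hcx
      have hA : pvLoopA (c :: t) =
          PySem.Int.floordiv ((tk.length : Int) + 1) 3 + pvLoopA dr := by
        rw [pvLoopA, hrun]
      have hdiv : PySem.Int.floordiv ((tk.length : Int) + 1) 3 = (((tk.length + 1) / 3 : Nat) : Int) := by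
        have : ((tk.length : Int) + 1) = (((tk.length + 1 : Nat)) : Int) := by push_cast; ring
        rw [this]
        rw [show ((3:Int)) = ((3 : Nat) : Int) from rfl]
        rw [PySem.Int.floordiv_natCast]
      have hlen : dr.length < n := by
        rw [← hn]
        have : dr.length ≤ t.length := hdr ▸ List.length_dropWhile_le _ _
        simp only [List.length_cons]
        omega
      have hB : pvLoopB (c :: t) = (((tk.length + 1) / 3 : Nat) : Int) + pvLoopB dr := by
        rw [hsplit]; exact pvLoopB_run (tk.length + 1) c dr hhead
      rw [hB, hA, hdiv, ih dr.length hlen dr rfl]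

-- ===== VERDICT (by name: the statement is the Claim_ definition above) =====
theorem minMove_spec : Claim_equal_minMove := by
  intro s _
  unfold Spec_minMove minMove minMove_alt
  exact (pvMain s.toList).symm
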